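-- pv_equiv track=rewrite | github.com/Mariangel16/ProyectoFinal | classifier.py | _has_only_regular_forms
-- ===== SOURCE A (Python) =====
-- from typing import Dict, List, Tuple, Set
--
-- Production = Tuple[str, str]
--
-- def _has_only_regular_forms(productions: List[Production]) -> bool:
--     """
--     Comprobación estricta de gramática REGULAR (Tipo 3) en forma derecha.
--
--     Reglas que validamos:
--
--     1. El lado izquierdo (LHS) de cada producción debe ser
--        un ÚNICO no terminal (una sola letra mayúscula), por ejemplo: S, A, B...
--
--     2. El lado derecho (RHS) debe cumplir una de estas formas:
--         - ε (cadena vacía)   -> representada como "" en nuestro parser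
--         - una cadena SOLO de terminales: a, b, aa, bb, ab, ...
--         - un terminal seguido de UN solo no terminal: aA, bS, 0B, ...
--
--        Es decir, si hay un no terminal en el RHS:
--         - solo puede haber UNO
--         - tiene que estar al FINAL (forma regular derecha)
--         - antes del no terminal solo puede haber terminales (minúsculas o dígitos)
--
--     Cualquier cosa como aSb (terminal + NT + terminal) rompe la regularidad.
--     """
--     for left, rhs in productions:
--         # 1) LHS debe ser EXACTAMENTE un no terminal mayúscula
--         if not (len(left) == 1 and left.isupper()):
--             return False
--
--         # Permitimos ε (cadena vacía)
--         if rhs == "":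
--             continue
--
--         # Posiciones de no terminales en el RHS
--         nt_positions = [i for i, ch in enumerate(rhs) if ch.isupper()]
--
--         # Más de un no terminal en el RHS -> no regular
--         if len(nt_positions) > 1:
--             return False
--
--         if len(nt_positions) == 1:
--             # Hay exactamente un no terminal
--             pos = nt_positions[0]
--
--             # Debe estar al FINAL (forma regular derecha)
--             if pos != len(rhs) - 1:
--                 return False
--
--             for ch in rhs[:pos]:
--                 if not (ch.islower() or ch.isdigit()):
--                     return False
--         else:
--             for ch in rhs:
--                 if not (ch.islower() or ch.isdigit()):
--                     return False
--
--     return True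
-- ===== SOURCE B (Python) =====
-- from typing import List, Tuple
--
-- Production = Tuple[str, str]
--
-- def _has_only_regular_forms(productions: List[Production]) -> bool:
--     # Peel a trailing non-terminal (if any) off the RHS; everything that
--     # remains must be terminals. A stray non-terminal (second NT, or an NT
--     # not at the end) stays inside the body and fails the terminal check.
--     def ok(left: str, rhs: str) -> bool:
--         if len(left) != 1 or not left.isupper():
--             return False
--         body = rhs[:-1] if rhs and rhs[-1].isupper() else rhs
--         return all(ch.islower() or ch.isdigit() for ch in body)
--     return all(ok(left, rhs) for left, rhs in productions)
-- ===== Notes on version B (the rewrite author's own statement) =====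
-- stated objective: simpler
-- what changed: Instead of building the list of all uppercase positions in the RHS and branching three ways on its count and location, B peels one trailing non-terminal off the RHS and runs a single terminal-only check over the remainder.
import Mathlib
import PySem

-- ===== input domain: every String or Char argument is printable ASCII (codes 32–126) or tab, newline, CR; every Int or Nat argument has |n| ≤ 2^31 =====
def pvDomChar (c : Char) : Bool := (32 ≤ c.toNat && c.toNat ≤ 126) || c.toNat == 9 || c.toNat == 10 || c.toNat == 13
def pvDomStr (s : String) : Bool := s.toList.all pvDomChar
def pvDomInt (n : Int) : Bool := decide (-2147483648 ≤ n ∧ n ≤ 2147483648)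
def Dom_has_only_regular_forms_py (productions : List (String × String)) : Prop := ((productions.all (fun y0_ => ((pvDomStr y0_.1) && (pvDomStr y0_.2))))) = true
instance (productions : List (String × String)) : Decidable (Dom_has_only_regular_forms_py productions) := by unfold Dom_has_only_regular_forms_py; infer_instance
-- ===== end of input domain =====

-- B replaces A's uppercase-position list and its three-way branch by peeling one
-- trailing non-terminal and running a single terminal-only check (objective: simpler).

-- ===== PORT A =====
-- str.isupper(): some cased char and every cased char uppercase; exact on the ASCII domain
def pvStrIsupper (s : String) : Bool :=
  s.toList.any PySem.Chars.isupper && s.toList.all (fun c => !PySem.Chars.islower c)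

-- A's per-production RHS check: positions of non-terminals, then branch on their count
def pvRhsRegularA (rhs : String) : Bool :=
  if rhs = "" then true
  else
    let ntpos : List Int :=
      ((PySem.List.enumerate rhs.toList 0).filter (fun p => PySem.Chars.isupper p.2)).map (·.1)
    if ntpos.length > 1 then false
    else if ntpos.length == 1 then
      let pos := ntpos[0]!
      if pos ≠ (rhs.toList.length : Int) - 1 then false
      else (PySem.List.slice rhs.toList none (some pos)).all
             (fun ch => PySem.Chars.islower ch || PySem.Chars.isdigit ch)
    else rhs.toList.all (fun ch => PySem.Chars.islower ch || PySem.Chars.isdigit ch)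

def has_only_regular_forms_py (productions : List (String × String)) : Bool :=
  match productions with
  | [] => true
  | (left, rhs) :: rest =>
    if !(left.toList.length == 1 && pvStrIsupper left) then false
    else if pvRhsRegularA rhs then has_only_regular_forms_py rest
    else false

-- ===== PORT B =====
def pvProdOkB (left rhs : String) : Bool :=
  if left.toList.length != 1 || !pvStrIsupper left then false
  else
    let r := rhs.toList
    -- body = rhs[:-1] if rhs and rhs[-1].isupper() else rhs
    let body :=
      if !r.isEmpty && ((PySem.List.pyGet? r (-1)).map PySem.Chars.isupper).getD false
      then PySem.List.slice r none (some (-1)) else r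
    body.all (fun ch => PySem.Chars.islower ch || PySem.Chars.isdigit ch)

def has_only_regular_forms_py_alt (productions : List (String × String)) : Bool :=
  productions.all (fun p => pvProdOkB p.1 p.2)

-- ===== PRECONDITION & SPEC =====
def Spec_has_only_regular_forms_py (productions : List (String × String)) (out : Bool) : Prop := out = has_only_regular_forms_py_alt productions
instance (productions : List (String × String)) (out : Bool) : Decidable (Spec_has_only_regular_forms_py productions out) := by unfold Spec_has_only_regular_forms_py; infer_instance

-- ===== CLAIM (what is proved, stated in full; the proofs are below) =====
def Claim_equal_has_only_regular_forms_py : Prop := ∀ (productions : List (String × String)), Dom_has_only_regular_forms_py productions → Spec_has_only_regular_forms_py productions (has_only_regular_forms_py productions)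

-- ===== LEMMAS AND PROOFS =====

-- a char passing the terminal check is never uppercase
lemma pv_ok_not_upper (c : Char) (h : (PySem.Chars.islower c || PySem.Chars.isdigit c) = true) :
    PySem.Chars.isupper c = false := by
  simp [PySem.Chars.islower, PySem.Chars.isdigit, PySem.Chars.isupper, Char.le_def,
        UInt32.le_iff_toNat_le] at *
  omega

lemma pv_all_ok_false_of_upper (s : List Char) (c : Char) (hc : c ∈ s)
    (hu : PySem.Chars.isupper c = true) :
    s.all (fun ch => PySem.Chars.islower ch || PySem.Chars.isdigit ch) = false := by
  rw [List.all_eq_false]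
  refine ⟨c, hc, ?_⟩
  intro h
  rw [pv_ok_not_upper c h] at hu
  exact Bool.false_ne_true hu

-- every member of the uppercase-position list is an index < length of an uppercase char
lemma pv_ntpos_mem (s : List Char) (p : Int)
    (hp : p ∈ ((PySem.List.enumerate s 0).filter (fun q => PySem.Chars.isupper q.2)).map (·.1)) :
    ∃ k : Nat, k < s.length ∧ p = (k : Int) ∧ PySem.Chars.isupper s[k]! = true := by
  rcases List.mem_map.1 hp with ⟨q, hq, hqp⟩
  rcases List.mem_filter.1 hq with ⟨hq1, hq2⟩
  rcases (PySem.List.mem_enumerate_iff _ _ _).1 hq1 with ⟨k, hk, rfl⟩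
  refine ⟨k, hk, ?_, ?_⟩
  · simpa using hqp.symm
  · simpa [getElem!_pos, hk] using hq2

-- core: A's three-way RHS branch equals B's peel-and-check
lemma pv_rhs_eq (rhs : String) :
    pvRhsRegularA rhs =
      (let r := rhs.toList
       let body :=
         if !r.isEmpty && ((PySem.List.pyGet? r (-1)).map PySem.Chars.isupper).getD false
         then PySem.List.slice r none (some (-1)) else r
       body.all (fun ch => PySem.Chars.islower ch || PySem.Chars.isdigit ch)) := by
  by_cases h0 : rhs = ""
  · subst h0; rfl
  · have hr : rhs.toList ≠ [] := by
      intro h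
      exact h0 (by
        have hx := congrArg String.ofList h
        simpa using hx)
    rcases List.eq_nil_or_concat' rhs.toList with hnil | ⟨s, c, hsc⟩
    · exact absurd hnil hr
    · unfold pvRhsRegularA
      rw [if_neg h0]
      rw [hsc]
      have henum : PySem.List.enumerate (s ++ [c]) (0 : Int)
          = PySem.List.enumerate s 0 ++ [((s.length : Int), c)] := by
        rw [PySem.List.enumerate_append]
        simp [PySem.List.enumerate_cons, PySem.List.enumerate_nil]
      rw [henum]
      set Ps := ((PySem.List.enumerate s (0 : Int)).filter
          (fun p => PySem.Chars.isupper p.2)).map (·.1) with hPs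
      by_cases hu : PySem.Chars.isupper c = true
      · -- trailing char is a non-terminal: B peels it
        have hB : (if !(s ++ [c]).isEmpty &&
              ((PySem.List.pyGet? (s ++ [c]) (-1)).map PySem.Chars.isupper).getD false
            then PySem.List.slice (s ++ [c]) none (some (-1)) else (s ++ [c]))
            = s := by
          simp [PySem.List.pyGet?, PySem.List.pyIdx?, hu, PySem.List.slice]
        simp only [hB]
        have hnt : (List.filter (fun p => PySem.Chars.isupper p.2)
            (PySem.List.enumerate s 0 ++ [((s.length : Int), c)])).map (·.1)
            = Ps ++ [(s.length : Int)] := by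
          rw [List.filter_append, List.map_append, ← hPs]
          simp [hu]
        rw [hnt]
        cases hps : Ps with
        | nil =>
          simp only [List.nil_append]
          have hslice : PySem.List.slice (s ++ [c]) none (some ((s.length : Int))) = s := by
            simpa using PySem.List.slice_to (s ++ [c]) s.length
          simp [hslice]
        | cons p ps =>
          -- at least two uppercase positions: A returns false, and s has an uppercase char
          have hpmem : p ∈ Ps := by rw [hps]; exact List.mem_cons_self
          rcases pv_ntpos_mem s p hpmem with ⟨k, hk, _, hupk⟩
          have hfalse : s.all (fun ch => PySem.Chars.islower ch || PySem.Chars.isdigit ch) = false := by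
            refine pv_all_ok_false_of_upper s s[k]! ?_ hupk
            simpa [getElem!_pos, hk] using List.getElem_mem hk
          simp [hfalse]
      · -- trailing char is not a non-terminal: B keeps the whole RHS
        have hu' : PySem.Chars.isupper c = false := by
          cases h : PySem.Chars.isupper c
          · rfl
          · exact absurd h hu
        have hB : (if !(s ++ [c]).isEmpty &&
              ((PySem.List.pyGet? (s ++ [c]) (-1)).map PySem.Chars.isupper).getD false
            then PySem.List.slice (s ++ [c]) none (some (-1)) else (s ++ [c]))
            = s ++ [c] := by
          simp [PySem.List.pyGet?, PySem.List.pyIdx?, hu']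
        simp only [hB]
        have hnt : (List.filter (fun p => PySem.Chars.isupper p.2)
            (PySem.List.enumerate s 0 ++ [((s.length : Int), c)])).map (·.1) = Ps := by
          rw [List.filter_append, List.map_append, ← hPs]
          simp [hu']
        rw [hnt]
        cases hps : Ps with
        | nil => simp
        | cons p ps =>
          have hpmem : p ∈ Ps := by rw [hps]; exact List.mem_cons_self
          rcases pv_ntpos_mem s p hpmem with ⟨k, hk, hpk, hupk⟩
          have hkmem : s[k]! ∈ s ++ [c] := by
            apply List.mem_append_left
            simpa [getElem!_pos, hk] using List.getElem_mem hk
          have hfalse : (s ++ [c]).all (fun ch => PySem.Chars.islower ch || PySem.Chars.isdigit ch)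
              = false := pv_all_ok_false_of_upper _ s[k]! hkmem hupk
          rw [hfalse]
          cases ps with
          | cons q qs => simp
          | nil =>
            -- single uppercase position, strictly before the end: A fails the position test
            have hne : p ≠ ((s ++ [c]).length : Int) - 1 := by
              rw [hpk]
              simp only [List.length_append, List.length_cons, List.length_nil]
              omega
            simp
            intro hp'
            exfalso
            rw [hpk] at hp'
            have hks : (k : Int) < (s.length : Int) := by exact_mod_cast hk
            omega

-- one production step of A equals B's per-production check
lemma pv_step (left rhs : String) (rest : List (String × String)) :
    has_only_regular_forms_py ((left, rhs) :: rest)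
      = (pvProdOkB left rhs && has_only_regular_forms_py rest) := by
  rw [has_only_regular_forms_py]
  by_cases hA : left.toList.length = 1 ∧ pvStrIsupper left = true
  · have h1 : (left.toList.length == 1 && pvStrIsupper left) = true := by
      simp [hA.1, hA.2]
    have h2 : (left.toList.length != 1 || !pvStrIsupper left) = false := by
      simp [hA.1, hA.2]
    rw [pvProdOkB, h2, h1]
    simp only [Bool.not_true, Bool.false_eq_true, if_false]
    rw [← pv_rhs_eq]
    cases pvRhsRegularA rhs <;> simp
  · have h1 : (left.toList.length == 1 && pvStrIsupper left) = false := by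
      cases h : (left.toList.length == 1 && pvStrIsupper left) with
      | false => rfl
      | true => exact absurd (by simpa using h) hA
    have h2 : (left.toList.length != 1 || !pvStrIsupper left) = true := by
      rcases not_and_or.1 hA with h | h
      · simp only [bne_iff_ne, Bool.or_eq_true, ne_eq]
        left
        simpa using h
      · simp at h
        simp [h]
    rw [pvProdOkB, if_pos h2, h1]
    simp

lemma pv_loop_eq (l : List (String × String)) :
    has_only_regular_forms_py l = has_only_regular_forms_py_alt l := by
  induction l with
  | nil => rfl
  | cons p rest ih =>
    obtain ⟨left, rhs⟩ := p
    rw [pv_step, ih]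
    rfl

-- ===== VERDICT (by name: the statement is the Claim_ definition above) =====
theorem has_only_regular_forms_py_spec : Claim_equal_has_only_regular_forms_py := by
  intro productions _
  unfold Spec_has_only_regular_forms_py
  exact pv_loop_eq productions
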